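-- pv_equiv track=rewrite | github.com/icml20260127/HELM | src/algorithms/optimal_root.py | bfs_tree_adjacency
-- ===== SOURCE A (Python) =====
-- from collections import deque, defaultdict
-- from typing import Optional, Dict, Any, List
--
-- def bfs_tree_adjacency(adj: Dict, root) -> Dict:
--     """
--     Create BFS tree using adjacency dict (235x faster than nx.bfs_tree).
--
--     Returns directed adjacency dict (parent -> children).
--     """
--     visited = {root}
--     queue = deque([root])
--     tree_adj = defaultdict(list)
--
--     while queue:
--         node = queue.popleft()
--         for neighbor in adj.get(node, []):
--             if neighbor not in visited:
--                 visited.add(neighbor)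
--                 queue.append(neighbor)
--                 tree_adj[node].append(neighbor)  # node -> neighbor (directed)
--
--     return dict(tree_adj)
-- ===== SOURCE B (Python) =====
-- def bfs_tree_adjacency(adj, root):
--     """Two staged passes: level-synchronous BFS that collects the directed tree
--     edges in discovery order, then a separate grouping pass that builds the
--     parent -> children dict from that edge list."""
--     # Phase 1: level-synchronous BFS producing the tree-edge list.
--     visited = {root}
--     frontier = [root]
--     edges = []
--     while frontier:
--         next_frontier = []
--         for node in frontier:
--             for neighbor in adj.get(node, []):
--                 if neighbor not in visited:
--                     visited.add(neighbor)
--                     next_frontier.append(neighbor)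
--                     edges.append((node, neighbor))
--         frontier = next_frontier
--     # Phase 2: group the edges by parent, preserving discovery order.
--     tree_adj = {}
--     for parent, child in edges:
--         tree_adj.setdefault(parent, []).append(child)
--     return tree_adj
-- ===== Notes on version B (the rewrite author's own statement) =====
-- stated objective: alternative
-- what changed: Replaced the single FIFO-deque loop that mutates the result dict inline by two staged passes: a level-synchronous BFS over explicit frontiers that only collects the directed tree edges in discovery order, followed by a separate grouping pass that folds that edge list into the parent->children dict.
import Mathlib
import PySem

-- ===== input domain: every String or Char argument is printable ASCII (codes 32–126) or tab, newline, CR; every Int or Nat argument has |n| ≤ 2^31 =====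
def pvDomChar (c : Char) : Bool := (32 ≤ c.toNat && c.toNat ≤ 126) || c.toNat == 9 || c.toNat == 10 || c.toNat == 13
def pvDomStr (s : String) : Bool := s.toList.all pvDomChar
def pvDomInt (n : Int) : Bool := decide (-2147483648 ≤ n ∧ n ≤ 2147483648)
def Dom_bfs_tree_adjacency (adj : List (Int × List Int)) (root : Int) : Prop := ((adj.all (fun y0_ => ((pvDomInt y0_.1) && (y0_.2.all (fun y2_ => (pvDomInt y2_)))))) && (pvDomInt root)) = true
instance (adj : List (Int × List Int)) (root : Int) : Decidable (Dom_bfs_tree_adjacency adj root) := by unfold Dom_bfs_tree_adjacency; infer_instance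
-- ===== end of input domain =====

-- B replaces A's single FIFO-queue loop that grows the result dict inline by two staged passes:
-- a level-synchronous BFS collecting the directed tree edges in discovery order, then a grouping
-- pass folding that edge list into the parent -> children dict (alternative decomposition).

-- termination-measure helper for both while-loops: number of still-unvisited distinct neighbor values
def pvUnvis (adj : List (Int × List Int)) (v : PySem.Set Int) : Nat :=
  ((PySem.List.dedup (adj.flatMap (fun p => p.2))).filter (fun m => !PySem.Set.contains v m)).length

-- strict count drop: removing a surviving element from the predicate shrinks the filtered length
theorem pvFilter_lt (l : List Int) (p p' : Int → Bool) (h : ∀ x, p' x = true → p x = true)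
    (m : Int) (hm : m ∈ l) (h1 : p m = true) (h2 : p' m = false) :
    (l.filter p').length < (l.filter p).length := by
  simp only [← List.countP_eq_length_filter]
  induction l with
  | nil => cases hm
  | cons a l ih =>
    rw [List.countP_cons, List.countP_cons]
    rcases List.mem_cons.1 hm with rfl | hm'
    · have hle : l.countP p' ≤ l.countP p := List.countP_mono_left (fun x _ => h x)
      simp [h1, h2]; omega
    · have := ih hm'
      have ha := h a
      by_cases hpa : p' a = true <;> simp [hpa, ha] at * <;> omega

-- visiting a genuinely new neighbor strictly shrinks the unvisited pool
theorem pvUnvis_add (adj : List (Int × List Int)) (v : PySem.Set Int) (m : Int)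
    (hm : m ∈ adj.flatMap (fun p => p.2)) (hv : PySem.Set.contains v m = false) :
    pvUnvis adj (PySem.Set.add v m) < pvUnvis adj v := by
  unfold pvUnvis
  refine pvFilter_lt _ _ _ ?_ m ?_ ?_ ?_
  · intro x hx
    simp only [Bool.not_eq_true'] at hx ⊢
    simp [PySem.Set.mem_add] at hx ⊢
    tauto
  · exact (PySem.List.mem_dedup _ _).mpr hm
  · simp at hv ⊢
    exact hv
  · simp [PySem.Set.mem_add]

-- ===== PORT A =====
-- state of A's while loop: (visited set, FIFO queue, tree adjacency dict)
abbrev PvStateA := PySem.Set Int × List Int × PySem.Dict Int (List Int)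

-- adj.get(node, []) — first match, as in the Python dict
def pvAdjGet (adj : List (Int × List Int)) (n : Int) : List Int :=
  PySem.Dict.getD (PySem.Dict.mk adj) n []

-- body of A's inner for-loop: visit one neighbor m of node n
-- (visited.add(m); queue.append(m); tree_adj[n].append(m))
def pvVisit (n : Int) : PvStateA → Int → PvStateA
  | (v, q, t), m =>
    if PySem.Set.contains v m then (v, q, t)
    else (PySem.Set.add v m, q ++ [m], PySem.Dict.modify t n [] (fun l => l ++ [m]))

-- termination lemmas for A's loop (cited by its decreasing_by)
theorem pvVisit_measure (adj : List (Int × List Int)) (n : Int) (s : PvStateA) (m : Int)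
    (hm : m ∈ adj.flatMap (fun p => p.2)) :
    (pvVisit n s m).2.1.length + pvUnvis adj (pvVisit n s m).1 ≤ s.2.1.length + pvUnvis adj s.1 := by
  obtain ⟨v, q, t⟩ := s
  by_cases hc : m ∈ v
  · simp [pvVisit, hc]
  · have hlt := pvUnvis_add adj v m hm (by simp [hc])
    rw [PySem.Set.add_of_not_mem hc] at hlt
    simp [pvVisit, hc]
    omega

theorem pvVisit_fold_measure (adj : List (Int × List Int)) (n : Int) (ms : List Int)
    (hms : ∀ m ∈ ms, m ∈ adj.flatMap (fun p => p.2)) (s : PvStateA) :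
    (ms.foldl (pvVisit n) s).2.1.length + pvUnvis adj (ms.foldl (pvVisit n) s).1
      ≤ s.2.1.length + pvUnvis adj s.1 := by
  induction ms generalizing s with
  | nil => exact le_rfl
  | cons m ms ih =>
    rw [List.foldl_cons]
    exact le_trans (ih (fun x hx => hms x (List.mem_cons_of_mem m hx)) (pvVisit n s m))
      (pvVisit_measure adj n s m (hms m List.mem_cons_self))

theorem pvAdjGet_subset (adj : List (Int × List Int)) (n : Int) :
    ∀ m ∈ pvAdjGet adj n, m ∈ adj.flatMap (fun p => p.2) := by
  intro m hm
  unfold pvAdjGet at hm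
  rw [PySem.Dict.getD_eq_get?_getD] at hm
  induction adj with
  | nil => simp [PySem.Dict.get?] at hm
  | cons kv rest ih =>
    rw [PySem.Dict.get?_mk_cons] at hm
    rw [List.flatMap_cons]
    split at hm
    · exact List.mem_append_left _ (by simpa using hm)
    · exact List.mem_append_right _ (ih hm)

theorem pvStepA_measure (adj : List (Int × List Int)) (n : Int) (v : PySem.Set Int)
    (rest : List Int) (t : PySem.Dict Int (List Int)) :
    ((pvAdjGet adj n).foldl (pvVisit n) (v, rest, t)).2.1.length
      + pvUnvis adj ((pvAdjGet adj n).foldl (pvVisit n) (v, rest, t)).1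
      < (n :: rest).length + pvUnvis adj v := by
  have h := pvVisit_fold_measure adj n (pvAdjGet adj n) (pvAdjGet_subset adj n) (v, rest, t)
  simp at h ⊢; omega

-- A's while loop: pop the head of the FIFO queue, visit its neighbors (appending new ones to the queue)
def bfsA_loop (adj : List (Int × List Int)) (v : PySem.Set Int) (q : List Int)
    (t : PySem.Dict Int (List Int)) : PySem.Dict Int (List Int) :=
  match q with
  | [] => t
  | n :: rest =>
    let s := (pvAdjGet adj n).foldl (pvVisit n) (v, rest, t)
    bfsA_loop adj s.1 s.2.1 s.2.2
termination_by q.length + pvUnvis adj v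
decreasing_by exact pvStepA_measure adj n v rest t

def bfs_tree_adjacency (adj : List (Int × List Int)) (root : Int) : List (Int × List Int) :=
  (bfsA_loop adj (PySem.Set.ofList [root]) [root] PySem.Dict.empty).items

-- ===== PORT B =====
-- B phase 1, inner for-loop: scan node n's neighbor list, extending visited / next_frontier / edges
def bfsB_nbrs (n : Int) (v : PySem.Set Int) (nf : List Int) (es : List (Int × Int)) :
    List Int → PySem.Set Int × List Int × List (Int × Int)
  | [] => (v, nf, es)
  | m :: ms =>
    if PySem.Set.contains v m then bfsB_nbrs n v nf es ms
    else bfsB_nbrs n (PySem.Set.add v m) (nf ++ [m]) (es ++ [(n, m)]) ms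

-- B phase 1, middle for-loop: process every node of the current frontier
def bfsB_nodes (adj : List (Int × List Int)) (v : PySem.Set Int) (nf : List Int)
    (es : List (Int × Int)) : List Int → PySem.Set Int × List Int × List (Int × Int)
  | [] => (v, nf, es)
  | n :: ns =>
    let s := bfsB_nbrs n v nf es (PySem.Dict.getD (PySem.Dict.mk adj) n [])
    bfsB_nodes adj s.1 s.2.1 s.2.2 ns

-- termination lemmas for B's while loop
theorem bfsB_nbrs_measure (adj : List (Int × List Int)) (n : Int) (ms : List Int)
    (hms : ∀ m ∈ ms, m ∈ adj.flatMap (fun p => p.2)) :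
    ∀ (v : PySem.Set Int) (nf : List Int) (es : List (Int × Int)),
    (bfsB_nbrs n v nf es ms).2.1.length + pvUnvis adj (bfsB_nbrs n v nf es ms).1
      ≤ nf.length + pvUnvis adj v := by
  induction ms with
  | nil => intro v nf es; exact le_rfl
  | cons m ms ih =>
    intro v nf es
    have hms' : ∀ x ∈ ms, x ∈ adj.flatMap (fun p => p.2) :=
      fun x hx => hms x (List.mem_cons_of_mem m hx)
    by_cases hc : PySem.Set.contains v m = true
    · simp only [bfsB_nbrs, hc, if_pos]
      exact ih hms' v nf es
    · have hcf : PySem.Set.contains v m = false := by simp at hc ⊢; exact hc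
      have hlt := pvUnvis_add adj v m (hms m List.mem_cons_self) hcf
      have h := ih hms' (PySem.Set.add v m) (nf ++ [m]) (es ++ [(n, m)])
      simp only [bfsB_nbrs, hc, if_neg, Bool.not_eq_true]
      simp at h ⊢
      omega

theorem bfsB_nodes_measure (adj : List (Int × List Int)) (ns : List Int) :
    ∀ (v : PySem.Set Int) (nf : List Int) (es : List (Int × Int)),
    (bfsB_nodes adj v nf es ns).2.1.length + pvUnvis adj (bfsB_nodes adj v nf es ns).1
      ≤ nf.length + pvUnvis adj v := by
  induction ns with
  | nil => intro v nf es; exact le_rfl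
  | cons n ns ih =>
    intro v nf es
    refine le_trans (ih _ _ _) ?_
    exact bfsB_nbrs_measure adj n _ (pvAdjGet_subset adj n) v nf es

theorem bfsB_level_measure (adj : List (Int × List Int)) (f : List Int) (hf : f ≠ [])
    (v : PySem.Set Int) (es : List (Int × Int)) :
    (bfsB_nodes adj v [] es f).2.1.length + pvUnvis adj (bfsB_nodes adj v [] es f).1
      < f.length + pvUnvis adj v := by
  have h := bfsB_nodes_measure adj f v [] es
  have hlen : 1 ≤ f.length := List.length_pos_iff.mpr hf
  simp at h
  omega

-- B phase 1, outer while-loop: consume whole frontiers, accumulating the edge list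
def bfsB_levels (adj : List (Int × List Int)) (v : PySem.Set Int) (f : List Int)
    (es : List (Int × Int)) : List (Int × Int) :=
  if hf : f = [] then es
  else
    let s := bfsB_nodes adj v [] es f
    bfsB_levels adj s.1 s.2.1 s.2.2
termination_by f.length + pvUnvis adj v
decreasing_by exact bfsB_level_measure adj f hf v es

-- B phase 2: group the edge list by parent (tree_adj.setdefault(parent, []).append(child))
def bfsB_group (t : PySem.Dict Int (List Int)) : List (Int × Int) → PySem.Dict Int (List Int)
  | [] => t
  | (p, c) :: es => bfsB_group (PySem.Dict.modify t p [] (fun l => l ++ [c])) es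

def bfs_tree_adjacency_alt (adj : List (Int × List Int)) (root : Int) : List (Int × List Int) :=
  (bfsB_group PySem.Dict.empty
    (bfsB_levels adj (PySem.Set.ofList [root]) [root] [])).items

-- ===== PRECONDITION & SPEC =====
def Spec_bfs_tree_adjacency (adj : List (Int × List Int)) (root : Int) (out : List (Int × List Int)) : Prop := out = bfs_tree_adjacency_alt adj root
instance (adj : List (Int × List Int)) (root : Int) (out : List (Int × List Int)) : Decidable (Spec_bfs_tree_adjacency adj root out) := by unfold Spec_bfs_tree_adjacency; infer_instance

-- ===== CLAIM (what is proved, stated in full; the proofs are below) =====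
def Claim_equal_bfs_tree_adjacency : Prop := ∀ (adj : List (Int × List Int)) (root : Int), Dom_bfs_tree_adjacency adj root → Spec_bfs_tree_adjacency adj root (bfs_tree_adjacency adj root)

-- ===== LEMMAS AND PROOFS =====

-- Bridge 1: A's queue loop equals an A-state LEVEL loop (proof-only intermediate bfsAlv).

-- queue factorization: a prefix q₁ of the pending list just rides along through the neighbor fold
theorem pvVisit_fold_shift (n : Int) (ms : List Int) (v : PySem.Set Int) (q₁ q₂ : List Int)
    (t : PySem.Dict Int (List Int)) :
    ms.foldl (pvVisit n) (v, q₁ ++ q₂, t)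
      = ((ms.foldl (pvVisit n) (v, q₂, t)).1,
         q₁ ++ (ms.foldl (pvVisit n) (v, q₂, t)).2.1,
         (ms.foldl (pvVisit n) (v, q₂, t)).2.2) := by
  induction ms generalizing v q₂ t with
  | nil => rfl
  | cons m ms ih =>
    rw [List.foldl_cons, List.foldl_cons]
    by_cases hc : PySem.Set.contains v m = true
    · simp only [pvVisit, hc, if_pos]
      exact ih v q₂ t
    · simp only [pvVisit, hc, if_neg, Bool.not_eq_true]
      rw [List.append_assoc]
      exact ih _ (q₂ ++ [m]) _

theorem pvLevel_measure (adj : List (Int × List Int)) (f : List Int) (hf : f ≠ [])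
    (v : PySem.Set Int) (t : PySem.Dict Int (List Int)) :
    (f.foldl (fun s n => (pvAdjGet adj n).foldl (pvVisit n) s) (v, [], t)).2.1.length
      + pvUnvis adj (f.foldl (fun s n => (pvAdjGet adj n).foldl (pvVisit n) s) (v, [], t)).1
      < f.length + pvUnvis adj v := by
  have hfold : ∀ (ns : List Int) (s : PvStateA),
      (ns.foldl (fun s n => (pvAdjGet adj n).foldl (pvVisit n) s) s).2.1.length
        + pvUnvis adj (ns.foldl (fun s n => (pvAdjGet adj n).foldl (pvVisit n) s) s).1
        ≤ s.2.1.length + pvUnvis adj s.1 := by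
    intro ns
    induction ns with
    | nil => intro s; exact le_rfl
    | cons n ns ih =>
      intro s
      rw [List.foldl_cons]
      exact le_trans (ih _) (pvVisit_fold_measure adj n (pvAdjGet adj n) (pvAdjGet_subset adj n) s)
  have h := hfold f (v, [], t)
  have hlen : 1 ≤ f.length := List.length_pos_iff.mpr hf
  simp at h
  omega

-- proof-only intermediate: level-synchronous loop over A's dict-carrying state
def bfsAlv (adj : List (Int × List Int)) (v : PySem.Set Int) (f : List Int)
    (t : PySem.Dict Int (List Int)) : PySem.Dict Int (List Int) :=
  if hf : f = [] then t
  else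
    let s := f.foldl (fun s n => (pvAdjGet adj n).foldl (pvVisit n) s) (v, [], t)
    bfsAlv adj s.1 s.2.1 s.2.2
termination_by f.length + pvUnvis adj v
decreasing_by rw [List.foldl_attach (l := f) (f := fun s n => (pvAdjGet adj n).foldl (pvVisit n) s)]; exact pvLevel_measure adj f hf v t

-- A's loop run on f ++ g equals: fold A's one-node step over f (news going after g), then continue
theorem pvLoopA_append (adj : List (Int × List Int)) (f : List Int) :
    ∀ (g : List Int) (v : PySem.Set Int) (t : PySem.Dict Int (List Int)),
    bfsA_loop adj v (f ++ g) t
      = bfsA_loop adj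
          (f.foldl (fun s n => (pvAdjGet adj n).foldl (pvVisit n) s) (v, g, t)).1
          (f.foldl (fun s n => (pvAdjGet adj n).foldl (pvVisit n) s) (v, g, t)).2.1
          (f.foldl (fun s n => (pvAdjGet adj n).foldl (pvVisit n) s) (v, g, t)).2.2 := by
  induction f with
  | nil => intro g v t; rfl
  | cons n f' ih =>
    intro g v t
    rw [List.cons_append, List.foldl_cons]
    rw [bfsA_loop]
    have hshift := pvVisit_fold_shift n (pvAdjGet adj n) v f' g t
    simp only [hshift]
    exact ih _ _ _

theorem pvLoop_eq (adj : List (Int × List Int)) :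
    ∀ (N : Nat) (v : PySem.Set Int) (f : List Int) (t : PySem.Dict Int (List Int)),
    f.length + pvUnvis adj v ≤ N → bfsA_loop adj v f t = bfsAlv adj v f t := by
  intro N
  induction N with
  | zero =>
    intro v f t h
    have hf : f = [] := by cases f <;> simp at h ⊢
    subst hf
    rw [bfsA_loop, bfsAlv]
    simp
  | succ N ih =>
    intro v f t h
    match f with
    | [] => rw [bfsA_loop, bfsAlv]; simp
    | n :: f' =>
      have hA := pvLoopA_append adj (n :: f') [] v t
      rw [List.append_nil] at hA
      have hB : bfsAlv adj v (n :: f') t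
          = bfsAlv adj
              ((n :: f').foldl (fun s n => (pvAdjGet adj n).foldl (pvVisit n) s) (v, [], t)).1
              ((n :: f').foldl (fun s n => (pvAdjGet adj n).foldl (pvVisit n) s) (v, [], t)).2.1
              ((n :: f').foldl (fun s n => (pvAdjGet adj n).foldl (pvVisit n) s) (v, [], t)).2.2 := by
        rw [bfsAlv]
        simp
      rw [hA, hB]
      apply ih
      have := pvLevel_measure adj (n :: f') (List.cons_ne_nil n f') v t
      omega

-- Bridge 2: the A-state level loop equals B's edge-collecting level loop followed by grouping.

-- grouping distributes over append
theorem bfsB_group_append (e₁ e₂ : List (Int × Int)) :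
    ∀ t : PySem.Dict Int (List Int), bfsB_group t (e₁ ++ e₂) = bfsB_group (bfsB_group t e₁) e₂ := by
  induction e₁ with
  | nil => intro t; rfl
  | cons pc e₁ ih =>
    intro t
    obtain ⟨p, c⟩ := pc
    rw [List.cons_append]
    exact ih _

-- accumulators nf / es just ride along through B's neighbor scan
theorem bfsB_nbrs_shift (n : Int) (ms : List Int) :
    ∀ (v : PySem.Set Int) (nf : List Int) (es : List (Int × Int)),
    bfsB_nbrs n v nf es ms
      = ((bfsB_nbrs n v [] [] ms).1,
         nf ++ (bfsB_nbrs n v [] [] ms).2.1,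
         es ++ (bfsB_nbrs n v [] [] ms).2.2) := by
  induction ms with
  | nil => intro v nf es; simp [bfsB_nbrs]
  | cons m ms ih =>
    intro v nf es
    by_cases hc : PySem.Set.contains v m = true
    · simp only [bfsB_nbrs, hc, if_pos]
      exact ih v nf es
    · simp only [bfsB_nbrs, hc, if_neg, Bool.not_eq_true, List.nil_append]
      rw [ih (PySem.Set.add v m) (nf ++ [m]) (es ++ [(n, m)]),
        ih (PySem.Set.add v m) [m] [(n, m)]]
      simp

-- the same for B's frontier scan
theorem bfsB_nodes_shift (adj : List (Int × List Int)) (ns : List Int) :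
    ∀ (v : PySem.Set Int) (nf : List Int) (es : List (Int × Int)),
    bfsB_nodes adj v nf es ns
      = ((bfsB_nodes adj v [] [] ns).1,
         nf ++ (bfsB_nodes adj v [] [] ns).2.1,
         es ++ (bfsB_nodes adj v [] [] ns).2.2) := by
  induction ns with
  | nil => intro v nf es; simp [bfsB_nodes]
  | cons n ns ih =>
    intro v nf es
    simp only [bfsB_nodes]
    rw [bfsB_nbrs_shift n _ v nf es]
    rw [ih _ (nf ++ _) (es ++ _)]
    conv_rhs => rw [bfsB_nbrs_shift n _ v [] []]
    rw [ih _ ([] ++ _) ([] ++ _)]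
    simp

-- one neighbor scan: A's dict-threading fold is B's edge scan plus grouping of the new edges
theorem pvSimNbrs (n : Int) (ms : List Int) :
    ∀ (v : PySem.Set Int) (q : List Int) (t : PySem.Dict Int (List Int)),
    ms.foldl (pvVisit n) (v, q, t)
      = ((bfsB_nbrs n v [] [] ms).1,
         q ++ (bfsB_nbrs n v [] [] ms).2.1,
         bfsB_group t (bfsB_nbrs n v [] [] ms).2.2) := by
  induction ms with
  | nil => intro v q t; simp [bfsB_nbrs, bfsB_group]
  | cons m ms ih =>
    intro v q t
    rw [List.foldl_cons]
    by_cases hc : PySem.Set.contains v m = true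
    · simp only [pvVisit, bfsB_nbrs, hc, if_pos]
      exact ih v q t
    · simp only [pvVisit, bfsB_nbrs, hc, if_neg, Bool.not_eq_true, List.nil_append]
      rw [ih (PySem.Set.add v m) (q ++ [m]) (PySem.Dict.modify t n [] (fun l => l ++ [m])),
        bfsB_nbrs_shift n ms (PySem.Set.add v m) [m] [(n, m)]]
      simp only [List.append_assoc, List.singleton_append, bfsB_group]

-- one level: A's node fold is B's frontier scan plus grouping of the new edges
theorem pvSimNodes (adj : List (Int × List Int)) (ns : List Int) :
    ∀ (v : PySem.Set Int) (q : List Int) (t : PySem.Dict Int (List Int)),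
    ns.foldl (fun s n => (pvAdjGet adj n).foldl (pvVisit n) s) (v, q, t)
      = ((bfsB_nodes adj v [] [] ns).1,
         q ++ (bfsB_nodes adj v [] [] ns).2.1,
         bfsB_group t (bfsB_nodes adj v [] [] ns).2.2) := by
  induction ns with
  | nil => intro v q t; simp [bfsB_nodes, bfsB_group]
  | cons n ns ih =>
    intro v q t
    rw [List.foldl_cons]
    have hA : (pvAdjGet adj n).foldl (pvVisit n) (v, q, t)
        = ((bfsB_nbrs n v [] [] (pvAdjGet adj n)).1,
           q ++ (bfsB_nbrs n v [] [] (pvAdjGet adj n)).2.1,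
           bfsB_group t (bfsB_nbrs n v [] [] (pvAdjGet adj n)).2.2) := pvSimNbrs n _ v q t
    rw [hA, ih]
    show _ = ((bfsB_nodes adj v [] [] (n :: ns)).1, _, _)
    simp only [bfsB_nodes]
    have hget : PySem.Dict.getD (PySem.Dict.mk adj) n [] = pvAdjGet adj n := rfl
    rw [hget]
    rw [bfsB_nodes_shift adj ns _ (bfsB_nbrs n v [] [] (pvAdjGet adj n)).2.1
        (bfsB_nbrs n v [] [] (pvAdjGet adj n)).2.2]
    rw [List.append_assoc, bfsB_group_append]

-- edge prefix rides along through B's while loop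
theorem bfsB_levels_shift (adj : List (Int × List Int)) :
    ∀ (N : Nat) (v : PySem.Set Int) (f : List Int) (es : List (Int × Int)),
    f.length + pvUnvis adj v ≤ N →
    bfsB_levels adj v f es = es ++ bfsB_levels adj v f [] := by
  intro N
  induction N with
  | zero =>
    intro v f es h
    have hf : f = [] := by cases f <;> simp at h ⊢
    subst hf
    simp [bfsB_levels]
  | succ N ih =>
    intro v f es h
    by_cases hf : f = []
    · subst hf; simp [bfsB_levels]
    · conv_lhs => rw [bfsB_levels]
      conv_rhs => rw [bfsB_levels]
      rw [dif_neg hf, dif_neg hf]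
      rw [bfsB_nodes_shift adj f v [] es]
      simp only [List.nil_append]
      have hm := bfsB_level_measure adj f hf v ([] : List (Int × Int))
      rw [ih (bfsB_nodes adj v [] [] f).1 (bfsB_nodes adj v [] [] f).2.1
            (es ++ (bfsB_nodes adj v [] [] f).2.2) (by omega),
          ih (bfsB_nodes adj v [] [] f).1 (bfsB_nodes adj v [] [] f).2.1
            (bfsB_nodes adj v [] [] f).2.2 (by omega)]
      simp

-- the A-state level loop is: collect B's edges, then group them onto the carried dict
theorem pvAlv_eq_group (adj : List (Int × List Int)) :
    ∀ (N : Nat) (v : PySem.Set Int) (f : List Int) (t : PySem.Dict Int (List Int)),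
    f.length + pvUnvis adj v ≤ N →
    bfsAlv adj v f t = bfsB_group t (bfsB_levels adj v f []) := by
  intro N
  induction N with
  | zero =>
    intro v f t h
    have hf : f = [] := by cases f <;> simp at h ⊢
    subst hf
    rw [bfsAlv]
    simp [bfsB_levels, bfsB_group]
  | succ N ih =>
    intro v f t h
    by_cases hf : f = []
    · subst hf; rw [bfsAlv]; simp [bfsB_levels, bfsB_group]
    · conv_lhs => rw [bfsAlv]
      conv_rhs => rw [bfsB_levels]
      rw [dif_neg hf, dif_neg hf]
      rw [pvSimNodes adj f v [] t]
      simp only [List.nil_append]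
      have hm := bfsB_level_measure adj f hf v ([] : List (Int × Int))
      rw [ih (bfsB_nodes adj v [] [] f).1 (bfsB_nodes adj v [] [] f).2.1
            (bfsB_group t (bfsB_nodes adj v [] [] f).2.2) (by omega)]
      rw [bfsB_levels_shift adj (N + 1) (bfsB_nodes adj v [] [] f).1
            (bfsB_nodes adj v [] [] f).2.1 (bfsB_nodes adj v [] [] f).2.2 (by omega)]
      rw [bfsB_group_append]

-- ===== VERDICT (by name: the statement is the Claim_ definition above) =====
theorem bfs_tree_adjacency_spec : Claim_equal_bfs_tree_adjacency := by
  intro adj root _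
  unfold Spec_bfs_tree_adjacency bfs_tree_adjacency bfs_tree_adjacency_alt
  rw [pvLoop_eq adj ([root].length + pvUnvis adj (PySem.Set.ofList [root])) _ _ _ le_rfl]
  rw [pvAlv_eq_group adj ([root].length + pvUnvis adj (PySem.Set.ofList [root])) _ _ _ le_rfl]
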